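-- pv_equiv track=rewrite | github.com/wzygxr/shuati | class101_DynamicProgrammingAndGreedyAlgorithms/Code01_BuyMonster.py | bribe_prisoners
-- ===== SOURCE A (Python) =====
-- from typing import List, Tuple
-- import math
--
-- def bribe_prisoners(n: int, prisoners: List[int]) -> int:
--     """
--     类似题目2: Bribe the Prisoners（Google Code Jam 2009）
--     区间动态规划解法
--
--     时间复杂度: O(m³)
--     空间复杂度: O(m²)
--     """
--     if not prisoners:
--         return 0
--
--     m = len(prisoners)
--     a = [0] * (m + 2)
--     a[0] = 0
--     for i in range(m):
--         a[i + 1] = prisoners[i]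
--     a[m + 1] = n + 1
--
--     # dp[i][j]: 释放编号在a[i]到a[j]之间的所有需要释放的犯人所需的最少金币数
--     dp: List[List[float]] = [[0] * (m + 2) for _ in range(m + 2)]
--
--     # 区间DP，按区间长度从小到大计算
--     for length in range(2, m + 2):
--         for i in range(0, m + 2 - length):
--             j = i + length
--             dp[i][j] = math.inf
--
--             # 枚举最后一个释放的犯人
--             for k in range(i + 1, j):
--                 cost = dp[i][k] + dp[k][j] + (a[j] - a[i] - 2)
--                 dp[i][j] = min(dp[i][j], cost)
--
--     return int(dp[0][m + 1])
-- ===== SOURCE B (Python) =====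
-- from typing import List
-- from functools import lru_cache
--
-- def bribe_prisoners(n: int, prisoners: List[int]) -> int:
--     """Top-down memoized interval recursion; the interval cost a[j]-a[i]-2 is
--     added once outside the min instead of inside every candidate."""
--     a = [0] + list(prisoners) + [n + 1]
--
--     @lru_cache(maxsize=None)
--     def f(i: int, j: int) -> int:
--         if j - i <= 1:
--             return 0
--         return min(f(i, k) + f(k, j) for k in range(i + 1, j)) + (a[j] - a[i] - 2)
--
--     return f(0, len(prisoners) + 1)
-- ===== Notes on version B (the rewrite author's own statement) =====
-- stated objective: alternative
-- what changed: The bottom-up O(m^2) float table with an inf sentinel and padded index arithmetic is replaced by a direct top-down memoized recursion on intervals, with the interval cost factored out of the min and no special empty-input case (the hinted Knuth-Yao optimization is not exact here: its monotone-split precondition fails for unsorted inputs, which the domain admits).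
import Mathlib
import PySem

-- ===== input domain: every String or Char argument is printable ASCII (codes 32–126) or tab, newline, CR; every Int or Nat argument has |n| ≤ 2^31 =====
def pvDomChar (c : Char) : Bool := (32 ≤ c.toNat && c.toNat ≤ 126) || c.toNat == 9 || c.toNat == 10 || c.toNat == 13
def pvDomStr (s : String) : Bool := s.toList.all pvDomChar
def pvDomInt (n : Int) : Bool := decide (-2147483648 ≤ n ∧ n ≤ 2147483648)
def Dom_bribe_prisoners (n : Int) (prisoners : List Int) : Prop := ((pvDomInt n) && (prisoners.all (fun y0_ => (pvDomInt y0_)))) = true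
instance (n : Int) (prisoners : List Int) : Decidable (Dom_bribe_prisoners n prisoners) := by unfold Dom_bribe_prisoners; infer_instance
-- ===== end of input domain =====

-- B replaces A's bottom-up padded float table by a top-down recursion on intervals
-- (same recurrence, different decomposition); equivalence of RETURN values is proved.

-- ===== PORT A =====
-- dp[i][j] lookup / in-place assignment of the Python 2D list
def pvGet2 (dp : List (List Int)) (i j : Nat) : Int := (dp.getD i []).getD j 0
def pvUpd2 (dp : List (List Int)) (i j : Nat) (v : Int) : List (List Int) :=
  dp.set i ((dp.getD i []).set j v)

-- port of A; math.inf is modeled by `none` (it never escapes: the k-loop is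
-- nonempty for every computed cell, and Python ints are exact)
def bribe_prisoners (n : Int) (prisoners : List Int) : Int :=
  if prisoners = [] then 0
  else
    let m := prisoners.length
    -- a[0]=0, a[i+1]=prisoners[i] for each i, a[m+1]=n+1
    let a : List Int := 0 :: (prisoners ++ [n + 1])
    let dp0 : List (List Int) := List.replicate (m + 2) (List.replicate (m + 2) (0 : Int))
    -- for length in range(2, m+2): for i in range(0, m+2-length): …
    let dp := (List.range' 2 m).foldl (fun dp length =>
      (List.range (m + 2 - length)).foldl (fun dp i =>
        let j := i + length
        -- dp[i][j] = inf; for k in range(i+1, j): dp[i][j] = min(dp[i][j], cost)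
        let cell := (List.range' (i + 1) (length - 1)).foldl (fun acc k =>
          let cost := pvGet2 dp i k + pvGet2 dp k j + (a.getD j 0 - a.getD i 0 - 2)
          some (match acc with | none => cost | some v => min v cost)) (none : Option Int)
        pvUpd2 dp i j (cell.getD 0)) dp) dp0
    pvGet2 dp 0 (m + 1)

-- ===== PORT B =====
-- Python's min over a nonempty list (the [] case is unreachable in this file)
def pymin (l : List Int) : Int := match l with | [] => 0 | x :: xs => xs.foldl min x

-- the memoized recursion f(i, j) of Source B (memoization is a caching detail;
-- the computed value is this recursion)
def pvF (a : List Int) (i j : Nat) : Int :=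
  if j ≤ i + 1 then 0
  else
    pymin (((List.range' (i + 1) (j - i - 1)).attach).map
      (fun k => pvF a i k.1 + pvF a k.1 j)) + (a.getD j 0 - a.getD i 0 - 2)
termination_by j - i
decreasing_by
  · have := List.mem_range'_1.mp k.2; omega
  · have := List.mem_range'_1.mp k.2; omega

def bribe_prisoners_alt (n : Int) (prisoners : List Int) : Int :=
  let a : List Int := 0 :: (prisoners ++ [n + 1])
  pvF a 0 (prisoners.length + 1)

-- ===== PRECONDITION & SPEC =====
def Spec_bribe_prisoners (n : Int) (prisoners : List Int) (out : Int) : Prop := out = bribe_prisoners_alt n prisoners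
instance (n : Int) (prisoners : List Int) (out : Int) : Decidable (Spec_bribe_prisoners n prisoners out) := by unfold Spec_bribe_prisoners; infer_instance

-- ===== CLAIM (what is proved, stated in full; the proofs are below) =====
def Claim_equal_bribe_prisoners : Prop := ∀ (n : Int) (prisoners : List Int), Dom_bribe_prisoners n prisoners → Spec_bribe_prisoners n prisoners (bribe_prisoners n prisoners)

-- ===== LEMMAS AND PROOFS =====

theorem pvF_base (a : List Int) (i j : Nat) (h : j ≤ i + 1) : pvF a i j = 0 := by
  rw [pvF]; simp [h]

theorem pvF_step (a : List Int) (i j : Nat) (h : i + 1 < j) :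
    pvF a i j = pymin ((List.range' (i + 1) (j - i - 1)).map
      (fun k => pvF a i k + pvF a k j)) + (a.getD j 0 - a.getD i 0 - 2) := by
  rw [pvF]
  simp [Nat.not_le.mpr h]

-- the Option-valued inner fold of A computes Python's min of the mapped list
theorem optfold_some (f : Nat → Int) (l : List Nat) (v : Int) :
    l.foldl (fun acc k =>
        some (match acc with | none => f k | some w => min w (f k))) (some v) =
      some ((l.map f).foldl min v) := by
  induction l generalizing v with
  | nil => rfl
  | cons x xs ih => simp [List.foldl, ih]

theorem optfold_none (f : Nat → Int) (l : List Nat) (hl : l ≠ []) :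
    l.foldl (fun acc k =>
        some (match acc with | none => f k | some w => min w (f k))) none =
      some (pymin (l.map f)) := by
  cases l with
  | nil => exact absurd rfl hl
  | cons x xs => simp [List.foldl, pymin, optfold_some]

theorem foldl_min_add (g : Nat → Int) (c : Int) :
    ∀ (xs : List Nat) (x : Int),
      (xs.map (fun k => g k + c)).foldl min (x + c) = (xs.map g).foldl min x + c := by
  intro xs
  induction xs with
  | nil => intro x; rfl
  | cons y ys ih =>
    intro x
    simp only [List.map, List.foldl]
    have h : min (x + c) (g y + c) = min x (g y) + c := by omega
    rw [h, ih]

theorem pymin_map_add (l : List Nat) (g : Nat → Int) (c : Int) (hl : l ≠ []) :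
    pymin (l.map (fun k => g k + c)) = pymin (l.map g) + c := by
  cases l with
  | nil => exact absurd rfl hl
  | cons x xs => simp only [List.map, pymin]; exact foldl_min_add g c xs (g x)

theorem pymin_congr (l : List Nat) (f g : Nat → Int) (h : ∀ k ∈ l, f k = g k) :
    pymin (l.map f) = pymin (l.map g) := by
  rw [List.map_congr_left h]

theorem get2_upd2 (dp : List (List Int)) (i j i' j' : Nat) (v : Int)
    (hi : i < dp.length) (hj : j < (dp.getD i []).length) :
    pvGet2 (pvUpd2 dp i j v) i' j' =
      if i' = i ∧ j' = j then v else pvGet2 dp i' j' := by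
  unfold pvGet2 pvUpd2
  simp only [List.getD_eq_getElem?_getD]
  rcases eq_or_ne i' i with rfl | hii
  · rw [List.getElem?_set_self hi]
    simp only [Option.getD_some]
    rcases eq_or_ne j' j with rfl | hjj
    · rw [List.getElem?_set_self (by simpa [List.getD_eq_getElem?_getD] using hj)]
      simp
    · rw [List.getElem?_set_ne (Ne.symm hjj)]
      simp [hjj]
  · rw [List.getElem?_set_ne (Ne.symm hii)]
    simp [hii]

theorem upd2_length (dp : List (List Int)) (i j : Nat) (v : Int) :
    (pvUpd2 dp i j v).length = dp.length := by simp [pvUpd2]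

theorem upd2_row_length (dp : List (List Int)) (i j : Nat) (v : Int) (t : Nat) :
    ((pvUpd2 dp i j v).getD t []).length = (dp.getD t []).length := by
  unfold pvUpd2
  rcases eq_or_ne t i with rfl | h
  · by_cases hi : t < dp.length
    · simp [List.getD_eq_getElem?_getD, List.getElem?_set_self hi]
    · rw [List.getD_eq_getElem?_getD, List.getD_eq_getElem?_getD,
        List.getElem?_eq_none (by simpa using (by omega : dp.length ≤ t)),
        List.getElem?_eq_none (by omega : dp.length ≤ t)]
  · simp [List.getD_eq_getElem?_getD, List.getElem?_set_ne (Ne.symm h)]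

-- the inner/outer loop bodies of A's port, named for the proofs (definitionally
-- equal to the lambdas inside bribe_prisoners)
def innerBody (a : List Int) (L : Nat) (dp : List (List Int)) (i : Nat) : List (List Int) :=
  let j := i + L
  let cell := (List.range' (i + 1) (L - 1)).foldl (fun acc k =>
    let cost := pvGet2 dp i k + pvGet2 dp k j + (a.getD j 0 - a.getD i 0 - 2)
    some (match acc with | none => cost | some v => min v cost)) (none : Option Int)
  pvUpd2 dp i j (cell.getD 0)

def outerBody (a : List Int) (M : Nat) (dp : List (List Int)) (L : Nat) : List (List Int) :=
  (List.range (M - L)).foldl (innerBody a L) dp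

-- the table invariant: shape, plus all cells of gap < L (and the processed
-- cells of gap exactly L) hold the recursion's value
def TInv (a : List Int) (M : Nat) (dp : List (List Int)) (L : Nat) (S : List Nat) : Prop :=
  dp.length = M ∧ (∀ t, t < M → (dp.getD t []).length = M) ∧
  ∀ i j : Nat, i < j → j < M → (j - i < L ∨ (j = i + L ∧ i ∈ S)) →
    pvGet2 dp i j = pvF a i j

theorem inner_step (a : List Int) (M L : Nat) (hL : 2 ≤ L)
    (dp : List (List Int)) (S : List Nat) (i : Nat) (hiM : i + L < M)
    (h : TInv a M dp L S) :
    TInv a M (innerBody a L dp i) L (i :: S) := by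
  obtain ⟨hlen, hrow, hval⟩ := h
  have hne : List.range' (i + 1) (L - 1) ≠ [] := by
    simp [List.range'_eq_nil_iff]; omega
  have hcell :
      ((List.range' (i + 1) (L - 1)).foldl (fun acc k =>
        let cost := pvGet2 dp i k + pvGet2 dp k (i + L) + (a.getD (i + L) 0 - a.getD i 0 - 2)
        some (match acc with | none => cost | some v => min v cost)) (none : Option Int)).getD 0
      = pvF a i (i + L) := by
    rw [optfold_none _ _ hne]
    have hmem : ∀ k ∈ List.range' (i + 1) (L - 1),
        (fun k => pvGet2 dp i k + pvGet2 dp k (i + L) + (a.getD (i + L) 0 - a.getD i 0 - 2)) k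
        = (fun k => pvF a i k + pvF a k (i + L) + (a.getD (i + L) 0 - a.getD i 0 - 2)) k := by
      intro k hk
      have hk' := List.mem_range'_1.mp hk
      have h1 : pvGet2 dp i k = pvF a i k := hval i k (by omega) (by omega) (by omega)
      have h2 : pvGet2 dp k (i + L) = pvF a k (i + L) :=
        hval k (i + L) (by omega) (by omega) (by omega)
      simp [h1, h2]
    rw [Option.getD_some, pymin_congr _ _ _ hmem,
      pymin_map_add _ (fun k => pvF a i k + pvF a k (i + L)) _ hne,
      pvF_step a i (i + L) (by omega)]
    have harith : i + L - i - 1 = L - 1 := by omega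
    rw [harith]
  refine ⟨?_, ?_, ?_⟩
  · show (pvUpd2 dp i (i + L) _).length = M
    rw [upd2_length]; exact hlen
  · intro t ht
    show ((pvUpd2 dp i (i + L) _).getD t []).length = M
    rw [upd2_row_length]; exact hrow t ht
  intro i' j' hij hjM hcond
  show pvGet2 (pvUpd2 dp i (i + L) _) i' j' = _
  rw [get2_upd2 _ _ _ _ _ _ (by omega) (by rw [hrow i (by omega)]; omega)]
  split_ifs with hcase
  · obtain ⟨rfl, rfl⟩ := hcase; exact hcell
  · apply hval i' j' hij hjM
    rcases hcond with hlt | ⟨hj, hmem⟩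
    · exact Or.inl hlt
    · rcases List.mem_cons.mp hmem with rfl | hS
      · exact absurd ⟨rfl, hj⟩ hcase
      · exact Or.inr ⟨hj, hS⟩

theorem inner_fold (a : List Int) (M L : Nat) (hL : 2 ≤ L) :
    ∀ (li : List Nat) (S : List Nat) (dp : List (List Int)),
    (∀ x ∈ li, x + L < M) → TInv a M dp L S →
    TInv a M (li.foldl (innerBody a L) dp) L (S ++ li) := by
  intro li
  induction li with
  | nil => intro S dp _ h; simpa using h
  | cons x xs ih =>
    intro S dp hx h
    rw [List.foldl_cons]
    have h1 := inner_step a M L hL dp S x (hx x List.mem_cons_self) h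
    have h2 := ih (x :: S) (innerBody a L dp x)
      (fun y hy => hx y (List.mem_cons_of_mem _ hy)) h1
    obtain ⟨u, v, w⟩ := h2
    refine ⟨u, v, fun i j hij hjM hc => w i j hij hjM ?_⟩
    rcases hc with hlt | ⟨hj, hmem⟩
    · exact Or.inl hlt
    · refine Or.inr ⟨hj, ?_⟩; simp at hmem ⊢; tauto

theorem tinv_succ (a : List Int) (M : Nat) (dp : List (List Int)) (L : Nat)
    (h : TInv a M dp L (List.range (M - L))) : TInv a M dp (L + 1) [] := by
  obtain ⟨u, v, w⟩ := h
  refine ⟨u, v, fun i j hij hjM hc => ?_⟩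
  rcases hc with hlt | ⟨_, hmem⟩
  · rcases Nat.lt_or_ge (j - i) L with h' | h'
    · exact w i j hij hjM (Or.inl h')
    · have hji : j = i + L := by omega
      exact w i j hij hjM (Or.inr ⟨hji, List.mem_range.mpr (by omega)⟩)
  · simp at hmem

theorem outer_fold (a : List Int) (M : Nat) :
    ∀ (t c : Nat) (dp : List (List Int)), 2 ≤ c → TInv a M dp c [] →
    TInv a M ((List.range' c t).foldl (outerBody a M) dp) (c + t) [] := by
  intro t
  induction t with
  | zero => intro c dp _ h; simpa using h
  | succ t ih =>
    intro c dp hc h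
    rw [List.range'_succ, List.foldl_cons]
    have h1 : TInv a M (outerBody a M dp c) c (([] : List Nat) ++ List.range (M - c)) :=
      inner_fold a M c hc (List.range (M - c)) [] dp
        (fun x hx => by have := List.mem_range.mp hx; omega) h
    have h2 := tinv_succ a M _ c (by simpa using h1)
    have h3 := ih (c + 1) _ (by omega) h2
    have harith : c + 1 + t = c + (t + 1) := by omega
    rwa [harith] at h3

-- ===== VERDICT (by name: the statement is the Claim_ definition above) =====
theorem bribe_prisoners_spec : Claim_equal_bribe_prisoners := by
  intro n prisoners _
  unfold Spec_bribe_prisoners bribe_prisoners bribe_prisoners_alt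
  by_cases hp : prisoners = []
  · subst hp; simp [pvF_base]
  · simp only [if_neg hp]
    set m := prisoners.length with hm
    have hm1 : 1 ≤ m := by
      cases prisoners with
      | nil => exact absurd rfl hp
      | cons x xs => simp [hm]
    set a : List Int := 0 :: (prisoners ++ [n + 1]) with ha
    have h0 : TInv a (m + 2) (List.replicate (m + 2) (List.replicate (m + 2) (0 : Int))) 2 [] := by
      refine ⟨by simp, fun t ht => ?_, fun i j hij hjM hc => ?_⟩
      · simp [List.getD_eq_getElem?_getD, ht]
      · have hj1 : j = i + 1 := by
          rcases hc with hlt | ⟨_, hmem⟩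
          · omega
          · simp at hmem
        have hi : i < m + 2 := by omega
        have hz : pvGet2 (List.replicate (m + 2) (List.replicate (m + 2) (0 : Int))) i j = 0 := by
          simp [pvGet2, List.getD_eq_getElem?_getD, hi, hjM]
        rw [hz, pvF_base a i j (by omega)]
    have hfinal := outer_fold a (m + 2) m 2 _ (by omega) h0
    obtain ⟨_, _, w⟩ := hfinal
    exact w 0 (m + 1) (by omega) (by omega) (Or.inl (by omega))
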